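-- pv_equiv track=rewrite | github.com/vitte-lang/vitte-lang | scripts/update_org_languages.py | parse_prefixes
-- ===== SOURCE A (Python) =====
-- def parse_prefixes(values):
--     prefixes = []
--     for raw in values or []:
--         for part in raw.split(","):
--             part = part.strip().lower()
--             if part:
--                 prefixes.append(part)
--     return prefixes
-- ===== SOURCE B (Python) =====
-- def parse_prefixes(values):
--     # Flatten once: join everything with ',' and split that single string.
--     parts = ",".join(values or []).split(",")
--     cleaned = (part.strip().lower() for part in parts)
--     return [p for p in cleaned if p]
-- ===== Notes on version B (the rewrite author's own statement) =====
-- stated objective: simpler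
-- what changed: Replaces the nested split-per-element append loop by a flatten-first pipeline: join all inputs with ',', split that single string once, then map strip/lower and filter non-empty in one pass.
import Mathlib
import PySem

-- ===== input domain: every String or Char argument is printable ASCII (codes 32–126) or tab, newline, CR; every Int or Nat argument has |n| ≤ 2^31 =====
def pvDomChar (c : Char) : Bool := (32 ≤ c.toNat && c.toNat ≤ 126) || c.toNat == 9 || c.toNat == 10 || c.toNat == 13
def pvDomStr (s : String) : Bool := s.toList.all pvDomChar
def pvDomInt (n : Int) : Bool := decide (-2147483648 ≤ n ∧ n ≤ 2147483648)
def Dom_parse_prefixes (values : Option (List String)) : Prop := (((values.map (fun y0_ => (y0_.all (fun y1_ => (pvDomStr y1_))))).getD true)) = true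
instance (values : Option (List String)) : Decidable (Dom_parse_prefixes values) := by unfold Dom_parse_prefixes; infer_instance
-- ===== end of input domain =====

-- B replaces A's nested split-per-element append loop by a flatten-first pipeline
-- (join with ',', one split, one map/filter pass); same cost, simpler shape.


-- ===== PORT A =====
-- 'raw.split(",")' is PySem.Str.split?; sep = "," ≠ "" so it is always 'some' and .getD [] is exact.
def parse_prefixes (values : Option (List String)) : List String :=
  (values.getD []).foldl (fun prefixes raw =>
    ((PySem.Str.split? raw ",").getD []).foldl (fun acc part =>
      let p := PySem.Str.lower (PySem.Str.strip part)
      if p ≠ "" then acc ++ [p] else acc) prefixes) []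

-- ===== PORT B =====
def parse_prefixes_alt (values : Option (List String)) : List String :=
  (((PySem.Str.split? (PySem.Str.join "," (values.getD [])) ",").getD []).map
      (fun part => PySem.Str.lower (PySem.Str.strip part))).filter (fun p => p ≠ "")

-- ===== PRECONDITION & SPEC =====
def Spec_parse_prefixes (values : Option (List String)) (out : List String) : Prop := out = parse_prefixes_alt values
instance (values : Option (List String)) (out : List String) : Decidable (Spec_parse_prefixes values out) := by unfold Spec_parse_prefixes; infer_instance

-- ===== CLAIM (what is proved, stated in full; the proofs are below) =====
def Claim_equal_parse_prefixes : Prop := ∀ (values : Option (List String)), Dom_parse_prefixes values → Spec_parse_prefixes values (parse_prefixes values)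

-- ===== LEMMAS AND PROOFS =====

-- Reference single-char split: pvSplit pre s splits s on ',' with pending piece pre.
def pvSplit (pre : List Char) : List Char → List (List Char)
  | [] => [pre]
  | c :: rest => if c = ',' then pre :: pvSplit [] rest else pvSplit (pre ++ [c]) rest

theorem pvGo_eq (fuel : Nat) : ∀ (l cur : List Char) (acc : List (List Char)),
    l.length ≤ fuel →
    PySem.Chars.splitOn.go [','] fuel l cur acc = acc.reverse ++ pvSplit cur.reverse l := by
  induction fuel with
  | zero =>
    intro l cur acc h
    have : l = [] := List.eq_nil_of_length_eq_zero (Nat.le_zero.mp h)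
    subst this
    simp [PySem.Chars.splitOn.go, pvSplit]
  | succ n ih =>
    intro l cur acc h
    cases l with
    | nil => simp [PySem.Chars.splitOn.go, pvSplit]
    | cons c rest =>
      by_cases hc : c = ','
      · subst hc
        rw [show PySem.Chars.splitOn.go [','] (n+1) (','::rest) cur acc
              = PySem.Chars.splitOn.go [','] n rest [] (cur.reverse :: acc) by
            simp [PySem.Chars.splitOn.go, List.isPrefixOf]]
        rw [ih rest [] (cur.reverse :: acc) (by simpa using Nat.lt_succ_iff.mp (by simpa using h))]
        simp [pvSplit]
      · rw [show PySem.Chars.splitOn.go [','] (n+1) (c::rest) cur acc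
              = PySem.Chars.splitOn.go [','] n rest (c :: cur) acc by
            simp [PySem.Chars.splitOn.go, List.isPrefixOf]
            intro h; exact absurd h.symm hc]
        rw [ih rest (c :: cur) acc (by simpa using Nat.lt_succ_iff.mp (by simpa using h))]
        simp [pvSplit, hc]

theorem splitOn_eq_pvSplit (s : List Char) : PySem.Chars.splitOn s [','] = pvSplit [] s := by
  unfold PySem.Chars.splitOn
  rw [pvGo_eq (s.length + 1) s [] [] (Nat.le_succ _)]
  simp

theorem pvSplit_append (a b : List Char) (pre : List Char) :
    pvSplit pre (a ++ ',' :: b) = pvSplit pre a ++ pvSplit [] b := by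
  induction a generalizing pre with
  | nil => simp [pvSplit]
  | cons c a ih =>
    by_cases hc : c = ','
    · subst hc; simp [pvSplit, ih]
    · simp [pvSplit, hc, ih]

theorem pvSplit_intercalate (x : List Char) (xs : List (List Char)) :
    pvSplit [] (List.intercalate [','] (x :: xs)) =
      pvSplit [] x ++ xs.flatMap (pvSplit []) := by
  induction xs generalizing x with
  | nil => simp [List.intercalate]
  | cons y ys ih =>
    have : List.intercalate [','] (x :: y :: ys) = x ++ ',' :: List.intercalate [','] (y :: ys) := by
      simp [List.intercalate, List.intersperse]
    rw [this, pvSplit_append, ih]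
    simp

theorem filter_flatMap {α β : Type} (l : List α) (g : α → List β) (p : β → Bool) :
    (l.flatMap g).filter p = l.flatMap (fun a => (g a).filter p) := by
  induction l with
  | nil => simp
  | cons x xs ih => simp [List.flatMap_cons, List.filter_append, ih]

-- Both ports, reduced to the same flatMap normal form.
theorem portA_eq (raws : List String) :
    (raws.foldl (fun prefixes raw =>
      ((PySem.Str.split? raw ",").getD []).foldl (fun acc part =>
        let p := PySem.Str.lower (PySem.Str.strip part)
        if p ≠ "" then acc ++ [p] else acc) prefixes) []) =
    raws.flatMap (fun raw =>
      ((pvSplit [] raw.toList).map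
        (fun cs => PySem.Str.lower (PySem.Str.strip (String.ofList cs)))).filter (fun p => p ≠ "")) := by
  have inner : ∀ (raw : String) (acc : List String),
      ((PySem.Str.split? raw ",").getD []).foldl (fun acc part =>
        let p := PySem.Str.lower (PySem.Str.strip part)
        if p ≠ "" then acc ++ [p] else acc) acc
      = acc ++ ((pvSplit [] raw.toList).map
          (fun cs => PySem.Str.lower (PySem.Str.strip (String.ofList cs)))).filter (fun p => p ≠ "") := by
    intro raw acc
    have h1 : (PySem.Str.split? raw ",").getD []
        = (pvSplit [] raw.toList).map String.ofList := by
      simp [PySem.Str.split?, PySem.Chars.split?, show (",".toList) = [','] from rfl,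
        splitOn_eq_pvSplit]
    rw [h1]
    rw [show (fun (acc : List String) (part : String) =>
          let p := PySem.Str.lower (PySem.Str.strip part)
          if p ≠ "" then acc ++ [p] else acc)
        = (fun acc part => if (decide (PySem.Str.lower (PySem.Str.strip part) ≠ "")) = true
            then acc ++ [PySem.Str.lower (PySem.Str.strip part)] else acc) by
        funext acc part; simp]
    rw [PySem.List.foldl_append_if]
    simp [List.filter_map, List.map_map, Function.comp_def]
  induction raws with
  | nil => rfl
  | cons r rs ih =>
    -- foldl over cons: first process r from [], then rs
    have step : ∀ (init : List String), rs.foldl (fun prefixes raw =>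
        ((PySem.Str.split? raw ",").getD []).foldl (fun acc part =>
          let p := PySem.Str.lower (PySem.Str.strip part)
          if p ≠ "" then acc ++ [p] else acc) prefixes) init
        = init ++ rs.flatMap (fun raw =>
          ((pvSplit [] raw.toList).map
            (fun cs => PySem.Str.lower (PySem.Str.strip (String.ofList cs)))).filter (fun p => p ≠ "")) := by
      intro init
      have := PySem.List.foldl_append_eq_flatMap (fun raw =>
        ((pvSplit [] raw.toList).map
          (fun cs => PySem.Str.lower (PySem.Str.strip (String.ofList cs)))).filter (fun p => p ≠ "")) rs init
      rw [← this]
      exact PySem.List.foldl_congr_mem rs _ _ init (fun acc x _ => inner x acc)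
    simp only [List.foldl_cons, inner r [], List.nil_append, step, List.flatMap_cons]

theorem portB_eq (raws : List String) :
    parse_prefixes_alt (some raws) =
    ((raws.map (fun r => r.toList)).flatMap (pvSplit []) |>.map
        (fun cs => PySem.Str.lower (PySem.Str.strip (String.ofList cs)))).filter (fun p => p ≠ "") ∨
    raws = [] := by
  cases raws with
  | nil => right; rfl
  | cons x xs =>
    left
    unfold parse_prefixes_alt
    have hj : (PySem.Str.join "," (x :: xs)).toList
        = List.intercalate [','] ((x :: xs).map (fun r => r.toList)) := by
      rw [PySem.Str.toList_join]; rfl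
    have h1 : (PySem.Str.split? (PySem.Str.join "," (x :: xs)) ",").getD []
        = (pvSplit [] (List.intercalate [','] ((x :: xs).map (fun r => r.toList)))).map String.ofList := by
      simp [PySem.Str.split?, PySem.Chars.split?, show (",".toList) = [','] from rfl,
        splitOn_eq_pvSplit, hj]
    simp only [Option.getD_some]
    rw [h1]
    rw [show ((x :: xs).map (fun r => r.toList)) = x.toList :: xs.map (fun r => r.toList) from rfl,
      pvSplit_intercalate]
    simp [List.map_map, Function.comp_def, List.flatMap_cons]

-- ===== VERDICT (by name: the statement is the Claim_ definition above) =====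
theorem parse_prefixes_spec : Claim_equal_parse_prefixes := by
  intro values _
  unfold Spec_parse_prefixes
  cases values with
  | none =>
    show parse_prefixes none = parse_prefixes_alt none
    decide
  | some raws =>
    cases raws with
    | nil =>
      show parse_prefixes (some []) = parse_prefixes_alt (some [])
      decide
    | cons x xs =>
      show parse_prefixes (some (x :: xs)) = parse_prefixes_alt (some (x :: xs))
      rcases portB_eq (x :: xs) with hB | hB
      · rw [hB]
        unfold parse_prefixes
        rw [show (some (x :: xs) : Option (List String)).getD [] = x :: xs from rfl]
        rw [portA_eq (x :: xs)]
        rw [List.map_flatMap, filter_flatMap, List.flatMap_map]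
      · exact absurd hB (by simp)
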